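-- pv_equiv track=rewrite | github.com/teshchaudhary/DSA | Graphs/CountTheNumberOfCompleteComponents.py | BFS
-- ===== SOURCE A (Python) =====
-- from collections import deque
--
-- def BFS(adj, s, visited):
--     q = deque([s])
--     visited[s] = True
--     nodes = {s}
--
--     while q:
--         node = q.popleft()
--         for neighbor in adj[node]:
--             if not visited[neighbor]:
--                 visited[neighbor] = True
--                 q.append(neighbor)
--                 nodes.add(neighbor)
--     for node in nodes:
--         if len(adj[node]) != len(nodes) - 1:
--             return 0
--
--     return 1
-- ===== SOURCE B (Python) =====
-- def BFS(adj, s, visited):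
--     # Fixed-point saturation instead of a queue: expand the frontier one layer
--     # per round, a bounded number of rounds; then the same completeness check.
--     blocked = {v for v, flag in visited.items() if flag}
--     nodes = {s}
--     frontier = {s}
--     for _ in range(len(adj) + 1):
--         frontier = {nb for v in frontier for nb in adj[v]
--                     if nb not in blocked and nb not in nodes}
--         nodes |= frontier
--     for v in nodes:
--         visited[v] = True
--     k = len(nodes) - 1
--     return 1 if all(len(adj[v]) == k for v in nodes) else 0
-- ===== Notes on version B (the rewrite author's own statement) =====
-- stated objective: alternative
-- what changed: Replaces the mutable deque/visited-flag BFS loop with a pure layer-by-layer fixed-point saturation: the blocked set is precomputed from visited once, the reachable set is grown one frontier layer per round for a bounded len(adj)+1 rounds, and the completeness test becomes a single all(); visited is bulk-updated afterwards.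
import Mathlib
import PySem

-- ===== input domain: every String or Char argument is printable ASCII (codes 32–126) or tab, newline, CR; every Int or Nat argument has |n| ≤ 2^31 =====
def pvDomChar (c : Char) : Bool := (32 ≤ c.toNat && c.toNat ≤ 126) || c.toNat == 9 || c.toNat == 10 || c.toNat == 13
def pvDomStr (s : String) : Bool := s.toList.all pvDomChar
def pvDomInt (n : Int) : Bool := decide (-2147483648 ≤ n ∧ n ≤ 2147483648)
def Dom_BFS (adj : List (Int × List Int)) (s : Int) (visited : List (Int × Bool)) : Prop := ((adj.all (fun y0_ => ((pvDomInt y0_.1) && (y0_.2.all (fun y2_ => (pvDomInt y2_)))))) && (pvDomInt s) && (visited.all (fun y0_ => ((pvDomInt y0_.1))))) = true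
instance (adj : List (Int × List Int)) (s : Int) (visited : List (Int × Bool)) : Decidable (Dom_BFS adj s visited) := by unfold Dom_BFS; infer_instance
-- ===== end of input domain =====

-- B replaces the deque/visited-flag BFS loop by a pure frontier fixed-point saturation
-- (objective: alternative). Both A and B mutate `visited` (they set exactly the component's
-- nodes to True); the equivalence proved here is about the RETURN value only.

-- ===== PORT A =====

-- number of keys currently mapped to False: the BFS termination measure
def pvFalseCount (l : List (Int × Bool)) : Nat := (l.filter (fun p => p.2 == false)).length

def pvAInner (ns : List Int) (q : List Int) (vd : PySem.Dict Int Bool)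
    (nodes : PySem.Set Int) : List Int × PySem.Dict Int Bool × PySem.Set Int :=
  match ns with
  | [] => (q, vd, nodes)
  | nb :: rest =>
    -- Python `if not visited[neighbor]` (KeyError on a missing key: excluded by Pre_;
    -- the default `true` makes the port skip such a neighbour)
    if vd.getD nb true = false then
      pvAInner rest (q ++ [nb]) (vd.insert nb true) (PySem.Set.add nodes nb)
    else
      pvAInner rest q vd nodes

theorem pvFalseCount_map_le (nb : Int) (l : List (Int × Bool)) :
    pvFalseCount (l.map (fun p => if (p.1 == nb) = true then (nb, true) else p)) ≤ pvFalseCount l := by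
  induction l with
  | nil => simp [pvFalseCount]
  | cons p t ih =>
    simp only [pvFalseCount, List.map_cons, List.filter_cons] at *
    by_cases h : (p.1 == nb) = true <;>
      · simp only [h, if_true]
        cases hb : (p.2 == false) <;> simp_all <;> omega

theorem pvFalseCount_map_lt (nb : Int) (l : List (Int × Bool))
    (h : (PySem.Dict.mk l).get? nb = some false) :
    pvFalseCount (l.map (fun p => if (p.1 == nb) = true then (nb, true) else p)) < pvFalseCount l := by
  induction l with
  | nil => cases h
  | cons p t ih =>
    obtain ⟨k, v⟩ := p
    rw [PySem.Dict.get?_mk_cons] at h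
    by_cases hk : (k == nb) = true
    · rw [if_pos hk] at h
      have hv : v = false := by simpa using h.symm
      subst hv
      have hle := pvFalseCount_map_le nb t
      simp only [pvFalseCount, List.map_cons, List.filter_cons, hk, if_true] at hle ⊢
      simp only [show ((k, false).2 == false) = true from rfl,
        show (((nb : Int), true).2 == false) = false from rfl]
      simp at hle ⊢
      omega
    · rw [if_neg hk] at h
      have := ih h
      simp only [pvFalseCount, List.map_cons, List.filter_cons, hk] at *
      cases hb : ((k, v).2 == false) <;> simp_all

theorem pvFalseCount_insert (vd : PySem.Dict Int Bool) (nb : Int)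
    (h : vd.getD nb true = false) :
    pvFalseCount (vd.insert nb true).items < pvFalseCount vd.items := by
  have hg : vd.get? nb = some false := by
    rw [PySem.Dict.getD_eq_get?_getD] at h
    cases hq : vd.get? nb with
    | none => rw [hq] at h; simp at h
    | some b => rw [hq] at h; simp at h; rw [h]
  have hc : vd.contains nb = true := by
    cases hcc : vd.contains nb
    · have := PySem.Dict.getD_of_not_contains vd (true : Bool) hcc
      rw [this] at h; simp at h
    · rfl
  rw [PySem.Dict.items_insert_of_contains vd true hc]
  obtain ⟨l⟩ := vd
  exact pvFalseCount_map_lt nb l hg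

-- the measure lemma pvALoop's decreasing_by cites
theorem pvAInner_measure (ns : List Int) : ∀ (q : List Int) (vd : PySem.Dict Int Bool)
    (nodes : PySem.Set Int),
    2 * pvFalseCount (pvAInner ns q vd nodes).2.1.items + (pvAInner ns q vd nodes).1.length
      ≤ 2 * pvFalseCount vd.items + q.length := by
  induction ns with
  | nil => intro q vd nodes; simp [pvAInner]
  | cons nb rest ih =>
    intro q vd nodes
    by_cases hg : vd.getD nb true = false
    · simp only [pvAInner]
      rw [if_pos hg]
      have h1 := ih (q ++ [nb]) (vd.insert nb true) (PySem.Set.add nodes nb)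
      have h2 := pvFalseCount_insert vd nb hg
      simp only [List.length_append, List.length_cons, List.length_nil] at *
      omega
    · simp only [pvAInner]
      rw [if_neg hg]
      exact ih q vd nodes

def pvALoop (adj : PySem.Dict Int (List Int)) (q : List Int) (vd : PySem.Dict Int Bool)
    (nodes : PySem.Set Int) : PySem.Dict Int Bool × PySem.Set Int :=
  match q with
  | [] => (vd, nodes)
  | node :: qt =>
    -- Python `adj[node]` (KeyError on a missing key: excluded by Pre_)
    let st := pvAInner (adj.getD node []) qt vd nodes
    pvALoop adj st.1 st.2.1 st.2.2
termination_by 2 * pvFalseCount vd.items + q.length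
decreasing_by
  have h := pvAInner_measure (adj.getD node []) qt vd nodes
  simp only [List.length_cons]
  omega

-- `for node in nodes: if len(adj[node]) != len(nodes)-1: return 0` / `return 1`
-- (consumes the set only through an order-independent any-fails test)
def pvACheck (adj : PySem.Dict Int (List Int)) (k : Int) : List Int → Int
  | [] => 1
  | node :: rest => if ((adj.getD node []).length : Int) ≠ k then 0 else pvACheck adj k rest

def BFS (adj : List (Int × List Int)) (s : Int) (visited : List (Int × Bool)) : Int :=
  let ad : PySem.Dict Int (List Int) := PySem.Dict.mk adj
  let vd := (PySem.Dict.mk visited).insert s true   -- visited[s] = True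
  let st := pvALoop ad [s] vd [s]                   -- q = deque([s]); nodes = {s}
  pvACheck ad ((st.2.length : Int) - 1) st.2

-- ===== PORT B =====

-- {nb for v in frontier for nb in adj[v] if nb not in blocked and nb not in nodes}
def pvBFrontier (adj : PySem.Dict Int (List Int)) (blocked : PySem.Set Int)
    (nodes : PySem.Set Int) (frontier : PySem.Set Int) : PySem.Set Int :=
  frontier.foldl (fun acc v =>
    (adj.getD v []).foldl (fun acc2 nb =>
      if !(PySem.Set.contains blocked nb) && !(PySem.Set.contains nodes nb)
      then PySem.Set.add acc2 nb else acc2) acc) PySem.Set.empty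

-- `for _ in range(len(adj)+1): frontier = {...}; nodes |= frontier`
def pvBIter (adj : PySem.Dict Int (List Int)) (blocked : PySem.Set Int) :
    Nat → PySem.Set Int → PySem.Set Int → PySem.Set Int × PySem.Set Int
  | 0, nodes, frontier => (nodes, frontier)
  | n + 1, nodes, frontier =>
    let f' := pvBFrontier adj blocked nodes frontier
    pvBIter adj blocked n (PySem.Set.union nodes f') f'

def BFS_alt (adj : List (Int × List Int)) (s : Int) (visited : List (Int × Bool)) : Int :=
  let ad : PySem.Dict Int (List Int) := PySem.Dict.mk adj
  -- blocked = {v for v, flag in visited.items() if flag}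
  let blocked : PySem.Set Int := PySem.Set.ofList ((visited.filter (fun p => p.2)).map Prod.fst)
  let nodes := (pvBIter ad blocked (adj.length + 1) [s] [s]).1
  -- (the `for v in nodes: visited[v] = True` bulk update mutates the argument only; no effect on the return)
  let k : Int := (nodes.length : Int) - 1
  if nodes.all (fun v => ((ad.getD v []).length : Int) == k) then 1 else 0

-- ===== PRECONDITION & SPEC =====
-- Pre_ needs 'node v is reachable from s through unvisited nodes' — a graph-SHAPE
-- property (transitive closure), not either port's loop: pvComponent is the standard
-- decidable rendering of that closure (expand one layer, |adj|+1 times suffices);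
-- it is used only to state Pre_ and is independent of both ports' algorithms/state.
def pvStepAll (adj : List (Int × List Int)) (visited : List (Int × Bool))
    (cur : PySem.Set Int) : PySem.Set Int :=
  PySem.Set.update cur (cur.flatMap (fun v => ((PySem.Dict.mk adj).getD v []).filter
    (fun nb => !((PySem.Dict.mk visited).getD nb true))))

def pvCompIter (adj : List (Int × List Int)) (visited : List (Int × Bool)) :
    Nat → PySem.Set Int → PySem.Set Int
  | 0, cur => cur
  | n + 1, cur => pvCompIter adj visited n (pvStepAll adj visited cur)

def pvComponent (adj : List (Int × List Int)) (visited : List (Int × Bool)) (s : Int) :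
    PySem.Set Int := pvCompIter adj visited (adj.length + 1) [s]

-- Pre_ = the inputs on which Python A returns: valid dicts (unique keys), the start node
-- a key of adj, and every node A explores a key of adj with all its neighbours keys of
-- visited (otherwise adj[node] / visited[neighbor] raises KeyError).
def Pre_BFS (adj : List (Int × List Int)) (s : Int) (visited : List (Int × Bool)) : Prop :=
  (adj.map Prod.fst).Nodup ∧ (visited.map Prod.fst).Nodup ∧
  s ∈ adj.map Prod.fst ∧
  ∀ v ∈ pvComponent adj visited s, v ∈ adj.map Prod.fst ∧
    ∀ nb ∈ (PySem.Dict.mk adj).getD v [], nb ∈ visited.map Prod.fst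
instance (adj : List (Int × List Int)) (s : Int) (visited : List (Int × Bool)) : Decidable (Pre_BFS adj s visited) := by unfold Pre_BFS; infer_instance

def pvWitness_BFS : (List (Int × List Int)) × Int × (List (Int × Bool)) :=
  ([(0, [1]), (1, [0])], 0, [(0, false), (1, false)])

def Spec_BFS (adj : List (Int × List Int)) (s : Int) (visited : List (Int × Bool)) (out : Int) : Prop := out = BFS_alt adj s visited
instance (adj : List (Int × List Int)) (s : Int) (visited : List (Int × Bool)) (out : Int) : Decidable (Spec_BFS adj s visited out) := by unfold Spec_BFS; infer_instance

-- ===== CLAIM (what is proved, stated in full; the proofs are below) =====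
def Claim_equal_BFS : Prop := ∀ (adj : List (Int × List Int)) (s : Int) (visited : List (Int × Bool)), Dom_BFS adj s visited → Pre_BFS adj s visited → Spec_BFS adj s visited (BFS adj s visited)

-- ===== LEMMAS AND PROOFS =====

-- the adjacency list of v, and "v is blocked at start" (missing key counts as blocked;
-- Pre_ guarantees every relevant v is a key)
def pvAdjOf (adj : List (Int × List Int)) (v : Int) : List Int :=
  (PySem.Dict.mk adj).getD v []

def pvBlk (visited : List (Int × Bool)) (v : Int) : Prop :=
  (PySem.Dict.mk visited).getD v true = true

-- the component A and B both compute: reachability from s through unblocked nodes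
inductive pvReach (adj : List (Int × List Int)) (visited : List (Int × Bool)) (s : Int) : Int → Prop
  | base : pvReach adj visited s s
  | step {u v : Int} : pvReach adj visited s u → v ∈ pvAdjOf adj u → ¬ pvBlk visited v →
      pvReach adj visited s v

theorem pvBlk_not_iff (visited : List (Int × Bool)) (y : Int) :
    ¬ pvBlk visited y ↔ (PySem.Dict.mk visited).getD y true = false := by
  unfold pvBlk
  cases h : (PySem.Dict.mk visited).getD y true
  · simp
  · simp

theorem pv_mem_stepAll (adj : List (Int × List Int)) (visited : List (Int × Bool))
    (cur : PySem.Set Int) (y : Int) :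
    y ∈ pvStepAll adj visited cur ↔
      y ∈ cur ∨ ∃ v ∈ cur, y ∈ pvAdjOf adj v ∧ ¬ pvBlk visited y := by
  unfold pvStepAll
  rw [PySem.Set.mem_update]
  constructor
  · rintro (h | h)
    · exact Or.inl h
    · obtain ⟨v, hv, hy⟩ := List.mem_flatMap.mp h
      have hf := List.mem_filter.mp hy
      refine Or.inr ⟨v, hv, hf.1, (pvBlk_not_iff visited y).mpr ?_⟩
      have := hf.2
      cases hg : (PySem.Dict.mk visited).getD y true
      · rfl
      · rw [hg] at this; exact absurd this (by simp)
  · rintro (h | ⟨v, hv, hy, hb⟩)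
    · exact Or.inl h
    · refine Or.inr (List.mem_flatMap.mpr ⟨v, hv, List.mem_filter.mpr ⟨hy, ?_⟩⟩)
      rw [(pvBlk_not_iff visited y).mp hb]
      rfl

theorem pv_stepAll_of_closed (adj : List (Int × List Int)) (visited : List (Int × Bool))
    (cur : PySem.Set Int)
    (h : ∀ v ∈ cur, ∀ nb ∈ pvAdjOf adj v, pvBlk visited nb ∨ nb ∈ cur) :
    pvStepAll adj visited cur = cur := by
  unfold pvStepAll
  rw [PySem.Set.update_eq_append_filter]
  have hnil : (PySem.Set.ofList (cur.flatMap (fun v => ((PySem.Dict.mk adj).getD v []).filter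
      (fun nb => !((PySem.Dict.mk visited).getD nb true))))).filter
      (fun y => !(PySem.Set.contains cur y)) = [] := by
    rw [List.filter_eq_nil_iff]
    intro a ha
    have hmem := (PySem.Set.mem_ofList _ a).mp ha
    obtain ⟨v, hv, hy⟩ := List.mem_flatMap.mp hmem
    have hf := List.mem_filter.mp hy
    have hnblk : ¬ pvBlk visited a := by
      rw [pvBlk_not_iff]
      have := hf.2
      cases hg : (PySem.Dict.mk visited).getD a true
      · rfl
      · rw [hg] at this; exact absurd this (by simp)
    have hacur : a ∈ cur := by
      rcases h v hv a hf.1 with h' | h'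
      · exact absurd h' hnblk
      · exact h'
    rw [(PySem.Set.contains_iff cur a).mpr hacur]
    simp
  rw [hnil, List.append_nil]

theorem pvCompIter_closed_fix (adj : List (Int × List Int)) (visited : List (Int × Bool))
    (n : Nat) : ∀ cur : PySem.Set Int,
    (∀ v ∈ cur, ∀ nb ∈ pvAdjOf adj v, pvBlk visited nb ∨ nb ∈ cur) →
    pvCompIter adj visited n cur = cur := by
  induction n with
  | zero => intro cur _; rfl
  | succ m ih =>
    intro cur h
    show pvCompIter adj visited m (pvStepAll adj visited cur) = cur
    rw [pv_stepAll_of_closed adj visited cur h]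
    exact ih cur h

theorem pvCompIter_mono (adj : List (Int × List Int)) (visited : List (Int × Bool))
    (n : Nat) : ∀ (cur : PySem.Set Int) (y : Int), y ∈ cur → y ∈ pvCompIter adj visited n cur := by
  induction n with
  | zero => intro cur y h; exact h
  | succ m ih =>
    intro cur y h
    exact ih (pvStepAll adj visited cur) y ((pv_mem_stepAll adj visited cur y).mpr (Or.inl h))

theorem pvCompIter_nodup (adj : List (Int × List Int)) (visited : List (Int × Bool))
    (n : Nat) : ∀ cur : PySem.Set Int, cur.Nodup → (pvCompIter adj visited n cur).Nodup := by
  induction n with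
  | zero => intro cur h; exact h
  | succ m ih =>
    intro cur h
    exact ih (pvStepAll adj visited cur) (PySem.Set.nodup_update cur _ h)

theorem pvCompIter_growth (adj : List (Int × List Int)) (visited : List (Int × Bool))
    (n : Nat) : ∀ cur : PySem.Set Int, cur.Nodup →
    (∀ v ∈ pvCompIter adj visited n cur, ∀ nb ∈ pvAdjOf adj v,
      pvBlk visited nb ∨ nb ∈ pvCompIter adj visited n cur) ∨
    cur.length + n ≤ (pvCompIter adj visited n cur).length := by
  induction n with
  | zero => intro cur _; exact Or.inr (by simp only [pvCompIter]; omega)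
  | succ m ih =>
    intro cur hnd
    by_cases hcl : ∀ v ∈ cur, ∀ nb ∈ pvAdjOf adj v, pvBlk visited nb ∨ nb ∈ cur
    · left
      rw [pvCompIter_closed_fix adj visited (m + 1) cur hcl]
      exact hcl
    · push Not at hcl
      obtain ⟨v, hv, nb, hnb, hnblk, hnbcur⟩ := hcl
      have hmem : nb ∈ pvStepAll adj visited cur :=
        (pv_mem_stepAll adj visited cur nb).mpr (Or.inr ⟨v, hv, hnb, hnblk⟩)
      have hndst : (pvStepAll adj visited cur).Nodup := PySem.Set.nodup_update cur _ hnd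
      have hgrow : cur.length + 1 ≤ (pvStepAll adj visited cur).length := by
        have hsub : cur.toFinset ⊂ (pvStepAll adj visited cur).toFinset := by
          constructor
          · intro y hy
            rw [List.mem_toFinset] at *
            exact (pv_mem_stepAll adj visited cur y).mpr (Or.inl hy)
          · intro hcon
            have : nb ∈ cur.toFinset := hcon (List.mem_toFinset.mpr hmem)
            exact hnbcur (List.mem_toFinset.mp this)
        have hc := Finset.card_lt_card hsub
        rw [List.toFinset_card_of_nodup hnd, List.toFinset_card_of_nodup hndst] at hc
        omega
      rcases ih (pvStepAll adj visited cur) hndst with h | h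
      · exact Or.inl h
      · exact Or.inr (by
          show cur.length + (m + 1) ≤ (pvCompIter adj visited m (pvStepAll adj visited cur)).length
          omega)

theorem pvComponent_char (adj : List (Int × List Int)) (s : Int) (visited : List (Int × Bool))
    (hpre : Pre_BFS adj s visited) :
    ∀ v, pvReach adj visited s v → v ∈ pvComponent adj visited s := by
  have hclosed : ∀ v ∈ pvComponent adj visited s, ∀ nb ∈ pvAdjOf adj v,
      pvBlk visited nb ∨ nb ∈ pvComponent adj visited s := by
    rcases pvCompIter_growth adj visited (adj.length + 1) [s] (by simp) with h | h
    · exact h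
    · exfalso
      have hbound : (pvComponent adj visited s).length ≤ adj.length := by
        have hsub : (pvComponent adj visited s).toFinset ⊆ (adj.map Prod.fst).toFinset := by
          intro y hy
          rw [List.mem_toFinset] at *
          exact (hpre.2.2.2 y hy).1
        have hc := Finset.card_le_card hsub
        rw [show (pvComponent adj visited s).toFinset.card = (pvComponent adj visited s).length
          from List.toFinset_card_of_nodup
            (pvCompIter_nodup adj visited (adj.length + 1) [s] (by simp))] at hc
        have := List.toFinset_card_le (adj.map Prod.fst)
        simp only [List.length_map] at this
        omega
      unfold pvComponent at hbound
      simp only [List.length_singleton] at h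
      omega
  intro v hv
  induction hv with
  | base => exact pvCompIter_mono adj visited (adj.length + 1) [s] s (List.mem_singleton.mpr rfl)
  | step hu hadj hblk ihm =>
    rename_i u w
    rcases hclosed u ihm w hadj with h | h
    · exact absurd h hblk
    · exact h

theorem pvAInner_inv (adj : List (Int × List Int)) (visited : List (Int × Bool)) (s node : Int)
    (hnode : pvReach adj visited s node) (ns : List Int) :
    ∀ (q : List Int) (vd : PySem.Dict Int Bool) (nodes : PySem.Set Int),
    (∀ nb ∈ ns, nb ∈ pvAdjOf adj node) →
    nodes.Nodup →
    (∀ v ∈ q, v ∈ nodes) →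
    (∀ v ∈ nodes, pvReach adj visited s v) →
    (∀ v, vd.getD v true = true ↔ (pvBlk visited v ∨ v ∈ nodes)) →
    (pvAInner ns q vd nodes).2.2.Nodup ∧
    (∀ v ∈ nodes, v ∈ (pvAInner ns q vd nodes).2.2) ∧
    (∀ v ∈ q, v ∈ (pvAInner ns q vd nodes).1) ∧
    (∀ v ∈ (pvAInner ns q vd nodes).1, v ∈ (pvAInner ns q vd nodes).2.2) ∧
    (∀ v ∈ (pvAInner ns q vd nodes).2.2, pvReach adj visited s v) ∧
    (∀ v, (pvAInner ns q vd nodes).2.1.getD v true = true ↔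
      (pvBlk visited v ∨ v ∈ (pvAInner ns q vd nodes).2.2)) ∧
    (∀ nb ∈ ns, (pvAInner ns q vd nodes).2.1.getD nb true = true) ∧
    (∀ v ∈ (pvAInner ns q vd nodes).2.2, v ∈ nodes ∨ v ∈ (pvAInner ns q vd nodes).1) := by
  induction ns with
  | nil =>
    intro q vd nodes _hns hnd hq hr he
    simp only [pvAInner]
    exact ⟨hnd, fun v hv => hv, fun v hv => hv, fun v hv => hq v hv, hr, he,
      fun nb hnb => absurd hnb (List.not_mem_nil), fun v hv => Or.inl hv⟩
  | cons nb rest ih =>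
    intro q vd nodes hns hnd hq hr he
    by_cases hg : vd.getD nb true = false
    · have hnblk : ¬ pvBlk visited nb ∧ nb ∉ nodes := by
        have := (he nb)
        rw [hg] at this
        simp only [show (false = true) = False by simp, false_iff] at this
        exact ⟨fun hb => this (Or.inl hb), fun hb => this (Or.inr hb)⟩
      have hrnb : pvReach adj visited s nb :=
        pvReach.step hnode (hns nb List.mem_cons_self) hnblk.1
      have hstep := ih (q ++ [nb]) (vd.insert nb true) (PySem.Set.add nodes nb)
        (fun x hx => hns x (List.mem_cons_of_mem nb hx))
        (PySem.Set.nodup_add nodes nb hnd)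
        (by
          intro v hv
          rw [PySem.Set.mem_add]
          rcases List.mem_append.mp hv with h | h
          · exact Or.inl (hq v h)
          · exact Or.inr (by simpa using h))
        (by
          intro v hv
          rcases (PySem.Set.mem_add nodes nb v).mp hv with h | h
          · exact hr v h
          · exact h ▸ hrnb)
        (by
          intro v
          rw [PySem.Dict.getD_insert, PySem.Set.mem_add]
          by_cases hv : v = nb
          · simp [hv]
          · rw [if_neg hv]
            rw [he v]
            constructor
            · rintro (h | h); exacts [Or.inl h, Or.inr (Or.inl h)]
            · rintro (h | h | h); exacts [Or.inl h, Or.inr h, absurd h hv])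
      obtain ⟨c1, c2, c3, c4, c5, c6, c7, c8⟩ := hstep
      have hstate : pvAInner (nb :: rest) q vd nodes =
          pvAInner rest (q ++ [nb]) (vd.insert nb true) (PySem.Set.add nodes nb) := by
        simp only [pvAInner]; rw [if_pos hg]
      rw [hstate]
      refine ⟨c1, ?_, ?_, c4, c5, c6, ?_, ?_⟩
      · intro v hv; exact c2 v ((PySem.Set.mem_add nodes nb v).mpr (Or.inl hv))
      · intro v hv; exact c3 v (List.mem_append.mpr (Or.inl hv))
      · intro x hx
        rcases List.mem_cons.mp hx with h | h
        · rw [h, c6 nb]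
          exact Or.inr (c2 nb ((PySem.Set.mem_add nodes nb nb).mpr (Or.inr rfl)))
        · exact c7 x h
      · intro v hv
        rcases c8 v hv with h | h
        · rcases (PySem.Set.mem_add nodes nb v).mp h with h' | h'
          · exact Or.inl h'
          · subst h'
            exact Or.inr (c3 v (List.mem_append.mpr (Or.inr List.mem_cons_self)))
        · exact Or.inr h
    · have hg' : vd.getD nb true = true := by
        cases hgg : vd.getD nb true
        · exact absurd hgg hg
        · rfl
      have hstep := ih q vd nodes (fun x hx => hns x (List.mem_cons_of_mem nb hx)) hnd hq hr he
      obtain ⟨c1, c2, c3, c4, c5, c6, c7, c8⟩ := hstep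
      have hstate : pvAInner (nb :: rest) q vd nodes = pvAInner rest q vd nodes := by
        simp only [pvAInner]; rw [if_neg hg]
      rw [hstate]
      refine ⟨c1, c2, c3, c4, c5, c6, ?_, c8⟩
      intro x hx
      rcases List.mem_cons.mp hx with h | h
      · rw [h, c6 nb]
        rcases (he nb).mp hg' with h' | h'
        · exact Or.inl h'
        · exact Or.inr (c2 nb h')
      · exact c7 x h

theorem pvALoop_inv (adj : List (Int × List Int)) (visited : List (Int × Bool)) (s : Int) :
    ∀ (q : List Int) (vd : PySem.Dict Int Bool) (nodes : PySem.Set Int),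
    nodes.Nodup →
    (∀ v ∈ q, v ∈ nodes) →
    (∀ v ∈ nodes, pvReach adj visited s v) →
    (∀ v, vd.getD v true = true ↔ (pvBlk visited v ∨ v ∈ nodes)) →
    (∀ v ∈ nodes, v ∉ q → ∀ nb ∈ pvAdjOf adj v, vd.getD nb true = true) →
    (pvALoop (PySem.Dict.mk adj) q vd nodes).2.Nodup ∧
    (∀ v ∈ nodes, v ∈ (pvALoop (PySem.Dict.mk adj) q vd nodes).2) ∧
    (∀ v ∈ (pvALoop (PySem.Dict.mk adj) q vd nodes).2, pvReach adj visited s v) ∧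
    (∀ v, (pvALoop (PySem.Dict.mk adj) q vd nodes).1.getD v true = true ↔
      (pvBlk visited v ∨ v ∈ (pvALoop (PySem.Dict.mk adj) q vd nodes).2)) ∧
    (∀ v ∈ (pvALoop (PySem.Dict.mk adj) q vd nodes).2, ∀ nb ∈ pvAdjOf adj v,
      (pvALoop (PySem.Dict.mk adj) q vd nodes).1.getD nb true = true) := by
  intro q vd nodes
  induction q, vd, nodes using pvALoop.induct (PySem.Dict.mk adj) with
  | case1 vd nodes =>
    intro hnd _hq hr he hf
    simp only [pvALoop]
    exact ⟨hnd, fun v hv => hv, hr, he,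
      fun v hv nb hnb => hf v hv (List.not_mem_nil) nb hnb⟩
  | case2 vd nodes node qt st ih =>
    intro hnd hq hr he hf
    have hnode : pvReach adj visited s node := hr node (hq node List.mem_cons_self)
    have hinner := pvAInner_inv adj visited s node hnode ((PySem.Dict.mk adj).getD node [])
      qt vd nodes (fun x hx => hx) hnd
      (fun v hv => hq v (List.mem_cons_of_mem node hv)) hr he
    obtain ⟨c1, c2, c3, c4, c5, c6, c7, c8⟩ := hinner
    have hres : pvALoop (PySem.Dict.mk adj) (node :: qt) vd nodes =
        pvALoop (PySem.Dict.mk adj)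
          (pvAInner ((PySem.Dict.mk adj).getD node []) qt vd nodes).1
          (pvAInner ((PySem.Dict.mk adj).getD node []) qt vd nodes).2.1
          (pvAInner ((PySem.Dict.mk adj).getD node []) qt vd nodes).2.2 := by
      rw [pvALoop]
    rw [hres]
    have hih := ih c1 c4 c5 c6 (by
      intro v hv hvq nb hnb
      rcases c8 v hv with h | h
      · by_cases hvn : v = node
        · exact c7 nb (hvn ▸ hnb)
        · have hvqt : v ∉ qt := fun hvt => hvq (c3 v hvt)
          have hvold : v ∉ node :: qt := by
            intro hc
            rcases List.mem_cons.mp hc with h' | h'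
            · exact hvn h'
            · exact hvqt h'
          have := hf v h hvold nb hnb
          rw [he nb] at this
          rw [c6 nb]
          rcases this with h' | h'
          · exact Or.inl h'
          · exact Or.inr (c2 nb h')
      · exact absurd h hvq)
    obtain ⟨d1, d2, d3, d4, d5⟩ := hih
    exact ⟨d1, fun v hv => d2 v (c2 v hv), d3, d4, d5⟩

theorem BFS_A_char (adj : List (Int × List Int)) (s : Int) (visited : List (Int × Bool)) :
    (pvALoop (PySem.Dict.mk adj) [s] ((PySem.Dict.mk visited).insert s true) [s]).2.Nodup ∧
    ∀ v, v ∈ (pvALoop (PySem.Dict.mk adj) [s] ((PySem.Dict.mk visited).insert s true) [s]).2 ↔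
      pvReach adj visited s v := by
  have h := pvALoop_inv adj visited s [s] ((PySem.Dict.mk visited).insert s true) [s]
    (by simp)
    (fun v hv => hv)
    (by intro v hv; rw [show v = s by simpa using hv]; exact pvReach.base)
    (by
      intro v
      rw [PySem.Dict.getD_insert]
      by_cases hv : v = s
      · simp [hv]
      · rw [if_neg hv]
        unfold pvBlk
        simp [hv])
    (by
      intro v hv hvq
      exact absurd hv hvq)
  obtain ⟨c1, c2, c3, c4, c5⟩ := h
  refine ⟨c1, fun v => ⟨c3 v, fun hr => ?_⟩⟩
  induction hr with
  | base => exact c2 s (List.mem_singleton.mpr rfl)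
  | step hu hnb hblk ihm =>
    rename_i u w
    have := c5 u ihm w hnb
    rw [c4 w] at this
    rcases this with h | h
    · exact absurd h hblk
    · exact h

-- membership in the inner comprehension fold
theorem pvB_mem_inner (blocked nodes : PySem.Set Int) (ns : List Int) :
    ∀ (acc : PySem.Set Int) (y : Int),
    y ∈ ns.foldl (fun acc2 nb =>
        if !(PySem.Set.contains blocked nb) && !(PySem.Set.contains nodes nb)
        then PySem.Set.add acc2 nb else acc2) acc ↔
      y ∈ acc ∨ (y ∈ ns ∧ y ∉ blocked ∧ y ∉ nodes) := by
  induction ns with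
  | nil => intro acc y; simp
  | cons nb rest ih =>
    intro acc y
    simp only [List.foldl_cons]
    by_cases hc : (!(PySem.Set.contains blocked nb) && !(PySem.Set.contains nodes nb)) = true
    · rw [if_pos hc, ih]
      rw [Bool.and_eq_true, Bool.not_eq_true', Bool.not_eq_true'] at hc
      have hb : nb ∉ blocked := fun h => by
        rw [(PySem.Set.contains_iff blocked nb).mpr h] at hc; exact absurd hc.1 (by simp)
      have hn : nb ∉ nodes := fun h => by
        rw [(PySem.Set.contains_iff nodes nb).mpr h] at hc; exact absurd hc.2 (by simp)
      rw [PySem.Set.mem_add]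
      constructor
      · rintro ((h | h) | h)
        · exact Or.inl h
        · exact Or.inr ⟨h ▸ List.mem_cons_self, h ▸ hb, h ▸ hn⟩
        · exact Or.inr ⟨List.mem_cons_of_mem nb h.1, h.2.1, h.2.2⟩
      · rintro (h | ⟨hy, hyb, hyn⟩)
        · exact Or.inl (Or.inl h)
        · rcases List.mem_cons.mp hy with h' | h'
          · exact Or.inl (Or.inr h')
          · exact Or.inr ⟨h', hyb, hyn⟩
    · rw [if_neg hc, ih]
      rw [Bool.and_eq_true, Bool.not_eq_true', Bool.not_eq_true'] at hc
      constructor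
      · rintro (h | h)
        · exact Or.inl h
        · exact Or.inr ⟨List.mem_cons_of_mem nb h.1, h.2.1, h.2.2⟩
      · rintro (h | ⟨hy, hyb, hyn⟩)
        · exact Or.inl h
        · rcases List.mem_cons.mp hy with h' | h'
          · subst h'
            exfalso
            apply hc
            constructor
            · cases hcb : PySem.Set.contains blocked y
              · rfl
              · exact absurd ((PySem.Set.contains_iff blocked y).mp hcb) hyb
            · cases hcn : PySem.Set.contains nodes y
              · rfl
              · exact absurd ((PySem.Set.contains_iff nodes y).mp hcn) hyn
          · exact Or.inr ⟨h', hyb, hyn⟩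

theorem pvB_mem_frontier (adjD : PySem.Dict Int (List Int)) (blocked nodes : PySem.Set Int)
    (frontier : List Int) :
    ∀ (acc : PySem.Set Int) (y : Int),
    y ∈ frontier.foldl (fun acc v =>
        (adjD.getD v []).foldl (fun acc2 nb =>
          if !(PySem.Set.contains blocked nb) && !(PySem.Set.contains nodes nb)
          then PySem.Set.add acc2 nb else acc2) acc) acc ↔
      y ∈ acc ∨ ∃ v ∈ frontier, y ∈ adjD.getD v [] ∧ y ∉ blocked ∧ y ∉ nodes := by
  induction frontier with
  | nil => intro acc y; simp
  | cons v rest ih =>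
    intro acc y
    simp only [List.foldl_cons]
    rw [ih, pvB_mem_inner]
    constructor
    · rintro ((h | h) | h)
      · exact Or.inl h
      · exact Or.inr ⟨v, List.mem_cons_self, h⟩
      · obtain ⟨u, hu, h⟩ := h
        exact Or.inr ⟨u, List.mem_cons_of_mem v hu, h⟩
    · rintro (h | ⟨u, hu, h⟩)
      · exact Or.inl (Or.inl h)
      · rcases List.mem_cons.mp hu with h' | h'
        · exact Or.inl (Or.inr (h' ▸ h))
        · exact Or.inr ⟨u, h', h⟩

theorem pvBIter_empty (adjD : PySem.Dict Int (List Int)) (blocked : PySem.Set Int) (n : Nat) :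
    ∀ (nodes : PySem.Set Int), pvBIter adjD blocked n nodes [] = (nodes, []) := by
  induction n with
  | zero => intro nodes; rfl
  | succ m ih =>
    intro nodes
    have hf : pvBFrontier adjD blocked nodes [] = PySem.Set.empty := rfl
    show pvBIter adjD blocked m
      (PySem.Set.union nodes (pvBFrontier adjD blocked nodes [])) (pvBFrontier adjD blocked nodes []) = _
    rw [hf]
    rw [show PySem.Set.union nodes PySem.Set.empty = nodes from PySem.Set.update_nil nodes]
    exact ih nodes

-- the main B-side invariant: frontier saturation computes exactly the reachable component
theorem pvBIter_inv (adj : List (Int × List Int)) (visited : List (Int × Bool)) (s : Int)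
    (blocked : PySem.Set Int)
    (hbl : ∀ u v : Int, pvReach adj visited s u → v ∈ pvAdjOf adj u →
      (v ∈ blocked ↔ pvBlk visited v)) :
    ∀ (n : Nat) (nodes frontier : PySem.Set Int),
    nodes.Nodup →
    (∀ v ∈ frontier, v ∈ nodes) →
    (∀ v ∈ nodes, pvReach adj visited s v) →
    s ∈ nodes →
    (∀ v ∈ nodes, v ∉ frontier → ∀ nb ∈ pvAdjOf adj v, nb ∈ blocked ∨ nb ∈ nodes) →
    (pvBIter (PySem.Dict.mk adj) blocked n nodes frontier).1.Nodup ∧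
    (∀ v ∈ nodes, v ∈ (pvBIter (PySem.Dict.mk adj) blocked n nodes frontier).1) ∧
    (∀ v ∈ (pvBIter (PySem.Dict.mk adj) blocked n nodes frontier).1, pvReach adj visited s v) ∧
    s ∈ (pvBIter (PySem.Dict.mk adj) blocked n nodes frontier).1 ∧
    (∀ v ∈ (pvBIter (PySem.Dict.mk adj) blocked n nodes frontier).1,
      v ∉ (pvBIter (PySem.Dict.mk adj) blocked n nodes frontier).2 →
      ∀ nb ∈ pvAdjOf adj v, nb ∈ blocked ∨ nb ∈ (pvBIter (PySem.Dict.mk adj) blocked n nodes frontier).1) ∧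
    ((pvBIter (PySem.Dict.mk adj) blocked n nodes frontier).2 = [] ∨
      nodes.length + n ≤ (pvBIter (PySem.Dict.mk adj) blocked n nodes frontier).1.length) := by
  intro n
  induction n with
  | zero =>
    intro nodes frontier hnd hfr hr hs hJ
    simp only [pvBIter]
    exact ⟨hnd, fun v hv => hv, hr, hs, hJ, Or.inr (by omega)⟩
  | succ m ih =>
    intro nodes frontier hnd hfr hr hs hJ
    set f' := pvBFrontier (PySem.Dict.mk adj) blocked nodes frontier with hf'
    have hmemf : ∀ y, y ∈ f' ↔ ∃ v ∈ frontier, y ∈ pvAdjOf adj v ∧ y ∉ blocked ∧ y ∉ nodes := by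
      intro y
      rw [hf']
      unfold pvBFrontier
      rw [pvB_mem_frontier]
      simp only [PySem.Set.empty]
      constructor
      · rintro (h | h)
        · cases h
        · exact h
      · exact fun h => Or.inr h
    have hstep : pvBIter (PySem.Dict.mk adj) blocked (m + 1) nodes frontier =
        pvBIter (PySem.Dict.mk adj) blocked m (PySem.Set.union nodes f') f' := rfl
    have hmemu : ∀ y, y ∈ PySem.Set.union nodes f' ↔ y ∈ nodes ∨ y ∈ f' :=
      fun y => PySem.Set.mem_union nodes f' y
    have hndu : (PySem.Set.union nodes f').Nodup := PySem.Set.nodup_union nodes f' hnd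
    have hru : ∀ v ∈ PySem.Set.union nodes f', pvReach adj visited s v := by
      intro v hv
      rcases (hmemu v).mp hv with h | h
      · exact hr v h
      · obtain ⟨u, hu, hvadj, hvb, _⟩ := (hmemf v).mp h
        exact pvReach.step (hr u (hfr u hu)) hvadj
          (fun hb => hvb ((hbl u v (hr u (hfr u hu)) hvadj).mpr hb))
    have hJu : ∀ v ∈ PySem.Set.union nodes f', v ∉ f' →
        ∀ nb ∈ pvAdjOf adj v, nb ∈ blocked ∨ nb ∈ PySem.Set.union nodes f' := by
      intro v hv hvf nb hnb
      rcases (hmemu v).mp hv with h | h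
      · by_cases hvfr : v ∈ frontier
        · by_cases hnbb : nb ∈ blocked
          · exact Or.inl hnbb
          · by_cases hnbn : nb ∈ nodes
            · exact Or.inr ((hmemu nb).mpr (Or.inl hnbn))
            · exact Or.inr ((hmemu nb).mpr (Or.inr ((hmemf nb).mpr ⟨v, hvfr, hnb, hnbb, hnbn⟩)))
        · rcases hJ v h hvfr nb hnb with h' | h'
          · exact Or.inl h'
          · exact Or.inr ((hmemu nb).mpr (Or.inl h'))
      · exact absurd h hvf
    by_cases hfe : f' = ([] : List Int)
    · rw [hstep, hfe]
      rw [show PySem.Set.union nodes ([] : List Int) = nodes from PySem.Set.update_nil nodes]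
      rw [pvBIter_empty]
      refine ⟨hnd, fun v hv => hv, hr, hs, ?_, Or.inl rfl⟩
      intro v hv hvf nb hnb
      have := hJu v ((hmemu v).mpr (Or.inl hv)) (hfe ▸ hvf) nb hnb
      rcases this with h | h
      · exact Or.inl h
      · rcases (hmemu nb).mp h with h' | h'
        · exact Or.inr h'
        · rw [hfe] at h'; cases h'
    · have hih := ih (PySem.Set.union nodes f') f'
        hndu
        (fun v hv => (hmemu v).mpr (Or.inr hv))
        hru
        ((hmemu s).mpr (Or.inl hs))
        hJu
      obtain ⟨d1, d2, d3, d4, d5, d6⟩ := hih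
      rw [hstep]
      refine ⟨d1, fun v hv => d2 v ((hmemu v).mpr (Or.inl hv)), d3, d4, d5, ?_⟩
      rcases d6 with h | h
      · exact Or.inl h
      · right
        have hgrow : nodes.length + 1 ≤ (PySem.Set.union nodes f').length := by
          obtain ⟨x, hx⟩ := List.exists_mem_of_ne_nil f' hfe
          obtain ⟨_, _, _, _, hxn⟩ := (hmemf x).mp hx
          have hsub : nodes.toFinset ⊂ (PySem.Set.union nodes f').toFinset := by
            constructor
            · intro y hy
              rw [List.mem_toFinset] at *
              exact (hmemu y).mpr (Or.inl hy)
            · intro hcon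
              have hxin : x ∈ nodes.toFinset := hcon (by
                rw [List.mem_toFinset]
                exact (hmemu x).mpr (Or.inr hx))
              rw [List.mem_toFinset] at hxin
              exact hxn hxin
          have hc := Finset.card_lt_card hsub
          rw [List.toFinset_card_of_nodup hnd, List.toFinset_card_of_nodup hndu] at hc
          omega
        omega

theorem pvReach_mem_cons_keys (adj : List (Int × List Int)) (s : Int) (visited : List (Int × Bool))
    (hpre : Pre_BFS adj s visited) :
    ∀ v, pvReach adj visited s v → v ∈ s :: adj.map Prod.fst := by
  intro v hv
  exact List.mem_cons_of_mem s
    ((hpre.2.2.2 v (pvComponent_char adj s visited hpre v hv)).1)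

-- every value listed in adj (i.e. occurring in some pvAdjOf) has an entry in visited,
-- so A's visited[nb] test and B's precomputed blocked set agree on it
theorem pvBlocked_bridge (adj : List (Int × List Int)) (s : Int) (visited : List (Int × Bool))
    (hpre : Pre_BFS adj s visited) :
    ∀ u v : Int, pvReach adj visited s u → v ∈ pvAdjOf adj u →
      (v ∈ PySem.Set.ofList ((visited.filter (fun p => p.2)).map Prod.fst) ↔ pvBlk visited v) := by
  intro u v hu hadj
  have hv : v ∈ visited.map Prod.fst :=
    (hpre.2.2.2 u (pvComponent_char adj s visited hpre u hu)).2 v hadj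
  obtain ⟨_hina, hinv, _hs, _hnb⟩ := hpre
  rw [PySem.Set.mem_ofList]
  obtain ⟨p, hp, hp1⟩ := List.mem_map.mp hv
  have hget : (PySem.Dict.mk visited).get? v = some p.2 := by
    have : (v, p.2) ∈ (PySem.Dict.mk visited).items := by
      show (v, p.2) ∈ visited
      rw [← hp1]
      exact hp
    exact PySem.Dict.get?_of_mem_items (PySem.Dict.mk visited) this hinv
  unfold pvBlk
  rw [PySem.Dict.getD_eq_get?_getD, hget]
  simp only [Option.getD_some]
  constructor
  · intro h
    obtain ⟨q, hq, hq1⟩ := List.mem_map.mp h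
    have hqf := List.mem_filter.mp hq
    have : (PySem.Dict.mk visited).get? v = some q.2 := by
      have hm : (v, q.2) ∈ (PySem.Dict.mk visited).items := by
        show (v, q.2) ∈ visited
        rw [← hq1]
        exact hqf.1
      exact PySem.Dict.get?_of_mem_items (PySem.Dict.mk visited) hm hinv
    rw [hget] at this
    rw [Option.some.inj this]
    exact hqf.2
  · intro h
    refine List.mem_map.mpr ⟨(v, p.2), List.mem_filter.mpr ⟨?_, h⟩, rfl⟩
    rw [← hp1]
    exact hp

theorem BFS_B_char (adj : List (Int × List Int)) (s : Int) (visited : List (Int × Bool))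
    (hpre : Pre_BFS adj s visited) :
    (pvBIter (PySem.Dict.mk adj)
        (PySem.Set.ofList ((visited.filter (fun p => p.2)).map Prod.fst))
        (adj.length + 1) [s] [s]).1.Nodup ∧
    ∀ v, v ∈ (pvBIter (PySem.Dict.mk adj)
        (PySem.Set.ofList ((visited.filter (fun p => p.2)).map Prod.fst))
        (adj.length + 1) [s] [s]).1 ↔ pvReach adj visited s v := by
  have hbl := pvBlocked_bridge adj s visited hpre
  have hinv := pvBIter_inv adj visited s
    (PySem.Set.ofList ((visited.filter (fun p => p.2)).map Prod.fst)) hbl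
    (adj.length + 1) [s] [s]
    (by simp)
    (fun v hv => hv)
    (by intro v hv; rw [show v = s by simpa using hv]; exact pvReach.base)
    (List.mem_singleton.mpr rfl)
    (by intro v hv hvf; exact absurd hv hvf)
  obtain ⟨d1, d2, d3, d4, d5, d6⟩ := hinv
  have hfe : (pvBIter (PySem.Dict.mk adj)
      (PySem.Set.ofList ((visited.filter (fun p => p.2)).map Prod.fst))
      (adj.length + 1) [s] [s]).2 = [] := by
    rcases d6 with h | h
    · exact h
    · exfalso
      have hbound : (pvBIter (PySem.Dict.mk adj)
          (PySem.Set.ofList ((visited.filter (fun p => p.2)).map Prod.fst))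
          (adj.length + 1) [s] [s]).1.length ≤ adj.length + 1 := by
        have hsub : (pvBIter (PySem.Dict.mk adj)
            (PySem.Set.ofList ((visited.filter (fun p => p.2)).map Prod.fst))
            (adj.length + 1) [s] [s]).1.toFinset ⊆ (s :: adj.map Prod.fst).toFinset := by
          intro y hy
          rw [List.mem_toFinset] at *
          exact pvReach_mem_cons_keys adj s visited hpre y (d3 y hy)
        have hc := Finset.card_le_card hsub
        rw [List.toFinset_card_of_nodup d1] at hc
        have := List.toFinset_card_le (s :: adj.map Prod.fst)
        simp only [List.length_cons, List.length_map] at this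
        omega
      simp only [List.length_singleton] at h
      omega
  refine ⟨d1, fun v => ⟨d3 v, fun hr => ?_⟩⟩
  induction hr with
  | base => exact d4
  | step hu hadj hblk ihm =>
    rename_i u w
    have hcl := d5 u ihm (by rw [hfe]; exact List.not_mem_nil) w hadj
    rcases hcl with h | h
    · exact absurd ((hbl u w (d3 u ihm) hadj).mp h) hblk
    · exact h

theorem pvACheck_eq_all (adj : PySem.Dict Int (List Int)) (k : Int) (l : List Int) :
    pvACheck adj k l = if l.all (fun v => ((adj.getD v []).length : Int) == k) then 1 else 0 := by
  induction l with
  | nil => simp [pvACheck]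
  | cons x xs ih =>
    by_cases h : ((adj.getD x []).length : Int) = k <;> simp [pvACheck, h, ih]

-- ===== VERDICT (by name: the statement is the Claim_ definition above) =====
theorem BFS_spec : Claim_equal_BFS := by
  intro adj s visited _hdom hpre
  unfold Spec_BFS BFS BFS_alt
  obtain ⟨hAnd, hAmem⟩ := BFS_A_char adj s visited
  obtain ⟨hBnd, hBmem⟩ := BFS_B_char adj s visited hpre
  have hperm : (pvALoop (PySem.Dict.mk adj) [s] ((PySem.Dict.mk visited).insert s true) [s]).2.Perm
      (pvBIter (PySem.Dict.mk adj)
        (PySem.Set.ofList ((visited.filter (fun p => p.2)).map Prod.fst))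
        (adj.length + 1) [s] [s]).1 := by
    rw [List.perm_ext_iff_of_nodup hAnd hBnd]
    intro v; rw [hAmem v, hBmem v]
  have hlen := hperm.length_eq
  rw [pvACheck_eq_all]
  have hall : ∀ (p : Int → Bool),
      (pvALoop (PySem.Dict.mk adj) [s] ((PySem.Dict.mk visited).insert s true) [s]).2.all p =
      (pvBIter (PySem.Dict.mk adj)
        (PySem.Set.ofList ((visited.filter (fun p => p.2)).map Prod.fst))
        (adj.length + 1) [s] [s]).1.all p := fun p => List.Perm.all_eq hperm
  simp only [hlen, hall]
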